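-- pv_equiv track=rewrite | github.com/amzn/autotrail | autotrail/helpers/cli_client.py | get_tag_keys_and_values
-- ===== SOURCE A (Python) =====
-- def get_tag_keys_and_values(list_of_tags):
--     """Creates a dictonary of all the tag keys and values from the list of tags provided.
--
--     If list_of_tags is:
--     [
--         {'n': 0, 'foo': 'bar'},
--         {'n': 1},
--         {'n': 2, 'foo': 'bar'},
--     ]
--
--     The returned dictonary will be:
--     {
--         'n': [0, 1, 2],
--         'foo': ['bar'],
--     }
--
--     Notice that repeated tag values are removed and only unique values are preserved.
--     """
--     tag_key_values = {}
--
--     for step_tags in list_of_tags: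
--         for key in step_tags:
--             if key in tag_key_values:
--                 if step_tags[key] not in tag_key_values[key]:
--                     tag_key_values[key].append(step_tags[key])
--             else:
--                 tag_key_values[key] = [step_tags[key]]
--     return tag_key_values
-- ===== SOURCE B (Python) =====
-- def get_tag_keys_and_values(list_of_tags):
--     # Two passes: first group every value under its key (duplicates kept),
--     # then rebuild each key's list dropping values already seen.
--     grouped = {}
--     for step_tags in list_of_tags:
--         for key in step_tags:
--             grouped.setdefault(key, []).append(step_tags[key])
--     result = {}
--     for key, values in grouped.items():
--         unique = []
--         for value in values:
--             if value not in unique: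
--                 unique.append(value)
--         result[key] = unique
--     return result
-- ===== Notes on version B (the rewrite author's own statement) =====
-- stated objective: alternative
-- what changed: B splits A's interleaved grouping+dedup into two distinct passes: one pass collects every value per key with setdefault/append (duplicates kept), a second pass rebuilds each key's order-preserving unique list.
import Mathlib
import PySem

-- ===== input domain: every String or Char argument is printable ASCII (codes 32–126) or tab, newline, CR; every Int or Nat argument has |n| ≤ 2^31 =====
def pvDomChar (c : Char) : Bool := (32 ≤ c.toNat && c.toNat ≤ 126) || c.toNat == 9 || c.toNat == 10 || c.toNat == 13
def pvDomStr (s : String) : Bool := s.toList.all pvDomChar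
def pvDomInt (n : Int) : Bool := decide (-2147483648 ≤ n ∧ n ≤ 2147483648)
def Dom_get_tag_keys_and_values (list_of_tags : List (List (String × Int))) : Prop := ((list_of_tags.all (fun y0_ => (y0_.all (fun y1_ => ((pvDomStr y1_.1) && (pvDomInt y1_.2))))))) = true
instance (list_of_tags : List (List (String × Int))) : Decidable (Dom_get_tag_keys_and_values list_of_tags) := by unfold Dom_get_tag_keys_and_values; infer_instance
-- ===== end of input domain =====

-- B replaces A's interleaved group-and-dedup loop with two distinct passes (group all values, then dedup each list); alternative decomposition, same cost.


-- ===== PORT A =====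
-- `tag_key_values[key].append(...)` under the `v not in ...` guard: update the FIRST entry with this key
def gtkvUpdA : List (String × List Int) → String → Int → List (String × List Int)
  | [], _, _ => []
  | e :: rest, k, v =>
      if e.1 == k then (e.1, if e.2.contains v then e.2 else e.2 ++ [v]) :: rest
      else e :: gtkvUpdA rest k v

def get_tag_keys_and_values (list_of_tags : List (List (String × Int))) : List (String × List Int) :=
  list_of_tags.foldl (fun acc step_tags =>
    step_tags.foldl (fun acc kv =>
      if acc.any (fun e => e.1 == kv.1) then gtkvUpdA acc kv.1 kv.2
      else acc ++ [(kv.1, [kv.2])]) acc) []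

-- ===== PORT B =====
-- `grouped.setdefault(key, []).append(value)`: append to the first entry with this key, or add a new entry
def gtkvGroup : List (String × List Int) → String → Int → List (String × List Int)
  | [], k, v => [(k, [v])]
  | e :: rest, k, v =>
      if e.1 == k then (e.1, e.2 ++ [v]) :: rest
      else e :: gtkvGroup rest k v

-- the second pass: order-preserving dedup of one value list
def gtkvDedup (vs : List Int) : List Int :=
  vs.foldl (fun unique v => if unique.contains v then unique else unique ++ [v]) []

def get_tag_keys_and_values_alt (list_of_tags : List (List (String × Int))) : List (String × List Int) :=
  (list_of_tags.foldl (fun grouped step_tags =>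
    step_tags.foldl (fun grouped kv => gtkvGroup grouped kv.1 kv.2) grouped) []).map
    (fun e => (e.1, gtkvDedup e.2))

-- ===== PRECONDITION & SPEC =====
def Spec_get_tag_keys_and_values (list_of_tags : List (List (String × Int))) (out : List (String × List Int)) : Prop := out = get_tag_keys_and_values_alt list_of_tags
instance (list_of_tags : List (List (String × Int))) (out : List (String × List Int)) : Decidable (Spec_get_tag_keys_and_values list_of_tags out) := by unfold Spec_get_tag_keys_and_values; infer_instance

-- ===== CLAIM (what is proved, stated in full; the proofs are below) =====
def Claim_equal_get_tag_keys_and_values : Prop := ∀ (list_of_tags : List (List (String × Int))), Dom_get_tag_keys_and_values list_of_tags → Spec_get_tag_keys_and_values list_of_tags (get_tag_keys_and_values list_of_tags)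

-- ===== LEMMAS AND PROOFS =====

-- the map applied entrywise in the invariant
def gtkvD (e : String × List Int) : String × List Int := (e.1, gtkvDedup e.2)

lemma gtkvDedup_append_singleton (xs : List Int) (v : Int) :
    gtkvDedup (xs ++ [v]) =
      if (gtkvDedup xs).contains v then gtkvDedup xs else gtkvDedup xs ++ [v] := by
  simp [gtkvDedup, List.foldl_append]

-- one pair commutes: applying A's step to the deduped state = dedup of B's grouping step
lemma gtkv_step_comm (g : List (String × List Int)) (k : String) (v : Int) :
    (if (g.map gtkvD).any (fun e => e.1 == k) then gtkvUpdA (g.map gtkvD) k v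
     else g.map gtkvD ++ [(k, [v])]) = (gtkvGroup g k v).map gtkvD := by
  induction g with
  | nil => simp [gtkvGroup, gtkvD, gtkvDedup]
  | cons e rest ih =>
    by_cases hk : e.1 == k
    · simp [gtkvGroup, hk, gtkvUpdA, gtkvD, gtkvDedup_append_singleton]
    · simp only [gtkvGroup, hk, List.map_cons, List.any_cons, gtkvD,
        Bool.false_or, gtkvUpdA]
      by_cases ha : (rest.map gtkvD).any (fun e => e.1 == k)
      · simpa [gtkvD, hk, ha, gtkvUpdA] using ih
      · simpa [gtkvD, hk, ha] using ih

-- one inner dict commutes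
lemma gtkv_inner_comm (step : List (String × Int)) (g : List (String × List Int)) :
    step.foldl (fun acc kv =>
      if acc.any (fun e => e.1 == kv.1) then gtkvUpdA acc kv.1 kv.2
      else acc ++ [(kv.1, [kv.2])]) (g.map gtkvD)
    = (step.foldl (fun grouped kv => gtkvGroup grouped kv.1 kv.2) g).map gtkvD := by
  induction step generalizing g with
  | nil => rfl
  | cons kv rest ih => simpa [List.foldl_cons, gtkv_step_comm g kv.1 kv.2] using ih (gtkvGroup g kv.1 kv.2)

-- the outer loops commute
lemma gtkv_outer_comm (lot : List (List (String × Int))) (g : List (String × List Int)) :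
    lot.foldl (fun acc step_tags =>
      step_tags.foldl (fun acc kv =>
        if acc.any (fun e => e.1 == kv.1) then gtkvUpdA acc kv.1 kv.2
        else acc ++ [(kv.1, [kv.2])]) acc) (g.map gtkvD)
    = (lot.foldl (fun grouped step_tags =>
        step_tags.foldl (fun grouped kv => gtkvGroup grouped kv.1 kv.2) grouped) g).map gtkvD := by
  induction lot generalizing g with
  | nil => rfl
  | cons step rest ih =>
    simpa [List.foldl_cons, gtkv_inner_comm step g]
      using ih (step.foldl (fun grouped kv => gtkvGroup grouped kv.1 kv.2) g)

-- ===== VERDICT (by name: the statement is the Claim_ definition above) =====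
theorem get_tag_keys_and_values_spec : Claim_equal_get_tag_keys_and_values := by
  intro lot _
  show get_tag_keys_and_values lot = get_tag_keys_and_values_alt lot
  have h := gtkv_outer_comm lot []
  simpa [get_tag_keys_and_values, get_tag_keys_and_values_alt, gtkvD] using h
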